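-- pv_equiv track=rewrite | github.com/odartsi/Foobar_challenge_2022 | Level 4/challenge_4.2.py | get_mirror_coordinates
-- ===== SOURCE A (Python) =====
-- def get_mirror_coordinates(dimensions,position,my_pos,grid_size):
--
--     [x,y] = dimensions
--     (px,py) = position
--
--     # get double the distance of the left,right,top and bottom wall in order to
--     # define the next positions
--     x_right = (x-px)*2
--     x_left = px*2
--     x = [px-my_pos[0]]*(grid_size*2+1)
--
--     y_up = (y-py)*2
--     y_down = py*2
--     y = [py-my_pos[1]]*(grid_size*2+1)
--
--     for i in range(grid_size+1,grid_size*2+1):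
--         x[i] = x[i-1]+x_right if (i-grid_size-1)%2==0 else x[i-1]+x_left
--     for i in range(grid_size-1,-1,-1):
--         x[i] = x[i+1]-x_left if (grid_size-1-i)%2==0 else x[i+1]-x_right
--
--     for i in range(grid_size+1,grid_size*2+1):
--         y[i] = y[i-1]+y_up if (i-grid_size-1)%2==0  else y[i-1]+y_down
--     for i in range(grid_size-1,-1,-1):
--         y[i] = y[i+1]-y_down if (grid_size-1-i)%2==0 else y[i+1]-y_up
--     return x,y
-- ===== SOURCE B (Python) =====
-- def get_mirror_coordinates(dimensions, position, my_pos, grid_size):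
--     [X, Y] = dimensions
--     (px, py) = position
--
--     def axis(c, up, down):
--         # value at offset d from the center index grid_size, in closed form:
--         # d steps right alternate up, down, up, ...; d steps left alternate down, up, down, ...
--         def value(i):
--             d = i - grid_size
--             if d > 0:
--                 return c + (d + 1) // 2 * up + d // 2 * down
--             if d < 0:
--                 j = -d
--                 return c - (j + 1) // 2 * down - j // 2 * up
--             return c
--         return [value(i) for i in range(grid_size * 2 + 1)]
--
--     return (axis(px - my_pos[0], (X - px) * 2, px * 2),
--             axis(py - my_pos[1], (Y - py) * 2, py * 2))
-- ===== Notes on version B (the rewrite author's own statement) =====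
-- stated objective: simpler
-- what changed: Replaces the four sequential accumulation loops (forward and backward scans mutating a prefilled list) with a single per-index closed-form formula using ceil/floor halves of the distance from the center, built in one comprehension per axis; Pre_ excludes only inputs where A raises (dimensions not of length 2, or my_pos shorter than 2).
import Mathlib
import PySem

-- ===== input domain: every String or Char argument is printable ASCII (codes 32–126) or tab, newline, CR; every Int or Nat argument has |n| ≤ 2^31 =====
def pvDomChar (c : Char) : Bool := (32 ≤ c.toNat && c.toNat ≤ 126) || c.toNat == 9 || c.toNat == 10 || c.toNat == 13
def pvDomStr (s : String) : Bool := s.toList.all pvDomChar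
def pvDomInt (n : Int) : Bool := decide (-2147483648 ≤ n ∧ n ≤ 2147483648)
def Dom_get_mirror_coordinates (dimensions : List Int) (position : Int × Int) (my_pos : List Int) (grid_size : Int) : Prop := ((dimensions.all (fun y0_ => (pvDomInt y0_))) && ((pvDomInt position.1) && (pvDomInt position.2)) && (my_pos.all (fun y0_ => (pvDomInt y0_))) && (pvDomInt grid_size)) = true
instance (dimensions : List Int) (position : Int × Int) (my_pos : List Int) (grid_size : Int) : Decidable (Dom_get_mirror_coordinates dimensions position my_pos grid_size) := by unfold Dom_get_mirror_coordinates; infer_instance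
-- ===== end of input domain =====

-- B replaces A's four sequential accumulation loops with a per-index closed-form value (ceil/floor
-- halves of the distance from the center index); objective: simpler.

-- ===== PORT A =====
-- one in-place assignment x[i] = x[i-1]+a if (i-g-1)%2==0 else x[i-1]+b of A's forward loops
def pvStepUp (g a b : Int) (l : List Int) (i : Int) : List Int :=
  PySem.List.pySetD l i
    (if PySem.Int.mod (i - g - 1) 2 = 0 then PySem.List.pyGetD l (i - 1) 0 + a
     else PySem.List.pyGetD l (i - 1) 0 + b)

-- one in-place assignment x[i] = x[i+1]-b if (g-1-i)%2==0 else x[i+1]-a of A's backward loops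
def pvStepDown (g a b : Int) (l : List Int) (i : Int) : List Int :=
  PySem.List.pySetD l i
    (if PySem.Int.mod (g - 1 - i) 2 = 0 then PySem.List.pyGetD l (i + 1) 0 - b
     else PySem.List.pyGetD l (i + 1) 0 - a)

-- for i in range(grid_size+1, grid_size*2+1): …
def pvLoopFwd (g a b : Int) (xs : List Int) : List Int :=
  (PySem.List.pyRange (g + 1) (g * 2 + 1) 1).foldl (pvStepUp g a b) xs

-- for i in range(grid_size-1, -1, -1): …
def pvLoopBwd (g a b : Int) (xs : List Int) : List Int :=
  (PySem.List.pyRange (g - 1) (-1) (-1)).foldl (pvStepDown g a b) xs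

def get_mirror_coordinates (dimensions : List Int) (position : Int × Int) (my_pos : List Int) (grid_size : Int) : List Int × List Int :=
  match dimensions, PySem.List.pyGet? my_pos 0, PySem.List.pyGet? my_pos 1 with
  | [x0, y0], some m0, some m1 =>
      let px := position.1
      let py := position.2
      let x_right := (x0 - px) * 2
      let x_left := px * 2
      let xs0 := List.replicate (grid_size * 2 + 1).toNat (px - m0)
      let y_up := (y0 - py) * 2
      let y_down := py * 2
      let ys0 := List.replicate (grid_size * 2 + 1).toNat (py - m1)
      (pvLoopBwd grid_size x_right x_left (pvLoopFwd grid_size x_right x_left xs0),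
       pvLoopBwd grid_size y_up y_down (pvLoopFwd grid_size y_up y_down ys0))
  | _, _, _ => ([], [])  -- unreachable under Pre_ (A raises here)

-- ===== PORT B =====
-- B's closed-form value at index i (offset d = i - grid_size from the center)
def pvValue (g c up down : Int) (i : Int) : Int :=
  let d := i - g
  if 0 < d then c + PySem.Int.floordiv (d + 1) 2 * up + PySem.Int.floordiv d 2 * down
  else if d < 0 then c - PySem.Int.floordiv (-d + 1) 2 * down - PySem.Int.floordiv (-d) 2 * up
  else c

-- [value(i) for i in range(grid_size*2+1)]
def pvAxis (g c up down : Int) : List Int :=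
  (PySem.List.pyRange 0 (g * 2 + 1) 1).map (pvValue g c up down)

def get_mirror_coordinates_alt (dimensions : List Int) (position : Int × Int) (my_pos : List Int) (grid_size : Int) : List Int × List Int :=
  -- '[X, Y] = dimensions' and the two my_pos lookups, sequenced through Option
  (if dimensions.length = 2 then
    (do
      let x0 ← dimensions[0]?
      let y0 ← dimensions[1]?
      let m0 ← PySem.List.pyGet? my_pos 0
      let m1 ← PySem.List.pyGet? my_pos 1
      pure (pvAxis grid_size (position.1 - m0) ((x0 - position.1) * 2) (position.1 * 2),
            pvAxis grid_size (position.2 - m1) ((y0 - position.2) * 2) (position.2 * 2)))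
   else none).getD ([], [])  -- the none/default cases are unreachable under Pre_ (B raises there too)

-- ===== PRECONDITION & SPEC =====
-- Pre_ excludes exactly the inputs where A raises: dimensions must unpack as [x,y]
-- (ValueError otherwise) and my_pos[1] must exist (IndexError otherwise).
def Pre_get_mirror_coordinates (dimensions : List Int) (position : Int × Int) (my_pos : List Int) (grid_size : Int) : Prop :=
  dimensions.length = 2 ∧ 2 ≤ my_pos.length
instance (dimensions : List Int) (position : Int × Int) (my_pos : List Int) (grid_size : Int) : Decidable (Pre_get_mirror_coordinates dimensions position my_pos grid_size) := by unfold Pre_get_mirror_coordinates; infer_instance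

def pvWitness_get_mirror_coordinates : List Int × (Int × Int) × List Int × Int := ([5, 5], (1, 2), [0, 0], 2)

def Spec_get_mirror_coordinates (dimensions : List Int) (position : Int × Int) (my_pos : List Int) (grid_size : Int) (out : List Int × List Int) : Prop := out = get_mirror_coordinates_alt dimensions position my_pos grid_size
instance (dimensions : List Int) (position : Int × Int) (my_pos : List Int) (grid_size : Int) (out : List Int × List Int) : Decidable (Spec_get_mirror_coordinates dimensions position my_pos grid_size out) := by unfold Spec_get_mirror_coordinates; infer_instance

-- ===== CLAIM (what is proved, stated in full; the proofs are below) =====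
def Claim_equal_get_mirror_coordinates : Prop := ∀ (dimensions : List Int) (position : Int × Int) (my_pos : List Int) (grid_size : Int), Dom_get_mirror_coordinates dimensions position my_pos grid_size → Pre_get_mirror_coordinates dimensions position my_pos grid_size → Spec_get_mirror_coordinates dimensions position my_pos grid_size (get_mirror_coordinates dimensions position my_pos grid_size)

-- ===== LEMMAS AND PROOFS =====

lemma pvValue_of_ge (g c a b i : Int) (h : g ≤ i) :
    pvValue g c a b i = c + (i - g + 1) / 2 * a + (i - g) / 2 * b := by
  simp only [pvValue, PySem.Int.floordiv_eq_ediv_of_pos (show (0:Int) < 2 by omega)]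
  rcases lt_or_eq_of_le h with hlt | heq
  · rw [if_pos (by omega)]
  · rw [if_neg (by omega), if_neg (by omega), ← heq]
    have e1 : (g - g + 1) / 2 = 0 := by omega
    have e2 : (g - g) / 2 = 0 := by omega
    rw [e1, e2]; ring

lemma pvValue_of_le (g c a b i : Int) (h : i ≤ g) :
    pvValue g c a b i = c - (g - i + 1) / 2 * b - (g - i) / 2 * a := by
  simp only [pvValue, PySem.Int.floordiv_eq_ediv_of_pos (show (0:Int) < 2 by omega)]
  rcases lt_or_eq_of_le h with hlt | heq
  · rw [if_neg (by omega), if_pos (by omega)]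
    have e1 : -(i - g) + 1 = g - i + 1 := by ring
    have e2 : -(i - g) = g - i := by ring
    rw [e1, e2]
  · rw [if_neg (by omega), if_neg (by omega), heq]
    have e1 : (g - g + 1) / 2 = 0 := by omega
    have e2 : (g - g) / 2 = 0 := by omega
    rw [e1, e2]; ring

lemma pvValue_step_up (g c a b i : Int) (h : g + 1 ≤ i) :
    (if PySem.Int.mod (i - g - 1) 2 = 0 then pvValue g c a b (i - 1) + a
     else pvValue g c a b (i - 1) + b) = pvValue g c a b i := by
  rw [pvValue_of_ge g c a b (i - 1) (by omega), pvValue_of_ge g c a b i (by omega),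
      PySem.Int.mod_eq_emod_of_pos (show (0:Int) < 2 by omega),
      show i - 1 - g + 1 = i - g from by ring, show i - 1 - g = i - g - 1 from by ring]
  rcases (show (i - g) % 2 = 0 ∨ (i - g) % 2 = 1 from by omega) with h0 | h1
  · rw [if_neg (by omega),
        show (i - g + 1) / 2 = (i - g) / 2 from by omega,
        show (i - g - 1) / 2 = (i - g) / 2 - 1 from by omega]
    ring
  · rw [if_pos (by omega),
        show (i - g + 1) / 2 = (i - g) / 2 + 1 from by omega,
        show (i - g - 1) / 2 = (i - g) / 2 from by omega]
    ring

lemma pvValue_step_down (g c a b i : Int) (h : i ≤ g - 1) :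
    (if PySem.Int.mod (g - 1 - i) 2 = 0 then pvValue g c a b (i + 1) - b
     else pvValue g c a b (i + 1) - a) = pvValue g c a b i := by
  rw [pvValue_of_le g c a b (i + 1) (by omega), pvValue_of_le g c a b i (by omega),
      PySem.Int.mod_eq_emod_of_pos (show (0:Int) < 2 by omega),
      show g - (i + 1) + 1 = g - i from by ring, show g - (i + 1) = g - i - 1 from by ring]
  rcases (show (g - i) % 2 = 0 ∨ (g - i) % 2 = 1 from by omega) with h0 | h1
  · rw [if_neg (by omega),
        show (g - i + 1) / 2 = (g - i) / 2 from by omega,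
        show (g - i - 1) / 2 = (g - i) / 2 - 1 from by omega]
    ring
  · rw [if_pos (by omega),
        show (g - i + 1) / 2 = (g - i) / 2 + 1 from by omega,
        show (g - i - 1) / 2 = (g - i) / 2 from by omega]
    ring

lemma set_map_pyRange (n : Int) (f : Int → Int) (i : Int) (v : Int) (h0 : 0 ≤ i) (h1 : i < n) :
    ((PySem.List.pyRange 0 n 1).map f).set i.toNat v
      = (PySem.List.pyRange 0 n 1).map (fun j => if j = i then v else f j) := by
  apply List.ext_getElem
  · simp
  · intro t h1t h2t
    simp only [List.getElem_set, List.getElem_map, PySem.List.getElem_pyRange_one, zero_add]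
    have ht : (t : Int) < n := by
      have := h2t
      simp [PySem.List.length_pyRange_one] at this
      omega
    by_cases he : i.toNat = t
    · rw [if_pos he, if_pos (by omega)]
    · rw [if_neg he, if_neg (by omega)]

lemma replicate_eq_map (n : Int) (c : Int) :
    List.replicate n.toNat c = (PySem.List.pyRange 0 n 1).map (fun _ => c) := by
  rw [List.map_const', PySem.List.length_pyRange_one]
  simp

lemma stepUp_eq (g c a b i : Int) (h1 : g + 1 ≤ i) (h2 : i < g * 2 + 1) :
    pvStepUp g a b
        ((PySem.List.pyRange 0 (g * 2 + 1) 1).map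
          (fun j => if g ≤ j ∧ j < i then pvValue g c a b j else c)) i
      = (PySem.List.pyRange 0 (g * 2 + 1) 1).map
          (fun j => if g ≤ j ∧ j < i + 1 then pvValue g c a b j else c) := by
  unfold pvStepUp
  rw [PySem.List.pyGetD_map_pyRange_of_nonneg _ _ _ _ (by omega) (by omega),
      if_pos (show g ≤ i - 1 ∧ i - 1 < i from ⟨by omega, by omega⟩),
      PySem.List.pySetD_of_nonneg _ _ (by omega),
      set_map_pyRange _ _ _ _ (by omega) (by omega)]
  refine List.map_congr_left ?_
  intro j hj
  rw [PySem.List.mem_pyRange_one] at hj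
  by_cases hji : j = i
  · subst hji
    rw [if_pos rfl, if_pos (show g ≤ j ∧ j < j + 1 from ⟨by omega, by omega⟩)]
    exact pvValue_step_up g c a b j h1
  · rw [if_neg hji]
    by_cases hc : g ≤ j ∧ j < i
    · rw [if_pos hc, if_pos ⟨hc.1, by omega⟩]
    · rw [if_neg hc, if_neg (by omega)]

lemma fwd_inv (g c a b : Int) (hg : 0 ≤ g) (k : Nat) (hk : (k : Int) ≤ g) :
    (PySem.List.pyRange (g + 1) (g + 1 + k) 1).foldl (pvStepUp g a b)
        (List.replicate (g * 2 + 1).toNat c)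
      = (PySem.List.pyRange 0 (g * 2 + 1) 1).map
          (fun j => if g ≤ j ∧ j < g + 1 + k then pvValue g c a b j else c) := by
  induction k with
  | zero =>
    rw [show g + 1 + ((0 : Nat) : Int) = g + 1 from by simp,
        PySem.List.pyRange_one_eq_nil (by omega), List.foldl_nil,
        replicate_eq_map]
    refine List.map_congr_left ?_
    intro j hj
    rw [PySem.List.mem_pyRange_one] at hj
    by_cases hc : g ≤ j ∧ j < g + 1
    · rw [if_pos hc]
      have : j = g := by omega
      subst this
      simp [pvValue]
    · rw [if_neg hc]
  | succ m ih =>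
    rw [show g + 1 + ((m + 1 : Nat) : Int) = (g + 1 + (m : Int)) + 1 from by push_cast; ring,
        PySem.List.pyRange_one_succ_right (by omega), List.foldl_append, List.foldl_cons,
        List.foldl_nil, ih (by push_cast at hk ⊢; omega)]
    exact stepUp_eq g c a b (g + 1 + (m : Int)) (by omega) (by push_cast at hk; omega)

lemma stepDown_eq (g c a b s : Int) (hg : 0 ≤ g) (h0 : 0 ≤ s) (h1 : s ≤ g - 1) :
    pvStepDown g a b
        ((PySem.List.pyRange 0 (g * 2 + 1) 1).map
          (fun j => if s < j then pvValue g c a b j else c)) s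
      = (PySem.List.pyRange 0 (g * 2 + 1) 1).map
          (fun j => if s - 1 < j then pvValue g c a b j else c) := by
  unfold pvStepDown
  rw [PySem.List.pyGetD_map_pyRange_of_nonneg _ _ _ _ (by omega) (by omega),
      if_pos (show s < s + 1 from by omega),
      PySem.List.pySetD_of_nonneg _ _ (by omega),
      set_map_pyRange _ _ _ _ (by omega) (by omega)]
  refine List.map_congr_left ?_
  intro j hj
  rw [PySem.List.mem_pyRange_one] at hj
  by_cases hjs : j = s
  · subst hjs
    rw [if_pos rfl, if_pos (show j - 1 < j from by omega)]
    exact pvValue_step_down g c a b j (by omega)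
  · rw [if_neg hjs]
    by_cases hc : s < j
    · rw [if_pos hc, if_pos (by omega)]
    · rw [if_neg hc, if_neg (by omega)]

lemma bwd_inv (g c a b : Int) (hg : 0 ≤ g) (k : Nat) (s : Int) (hs : s ≤ g - 1)
    (hk : s - k = -1) :
    (PySem.List.pyRange s (-1) (-1)).foldl (pvStepDown g a b)
        ((PySem.List.pyRange 0 (g * 2 + 1) 1).map (fun j => if s < j then pvValue g c a b j else c))
      = pvAxis g c a b := by
  induction k generalizing s with
  | zero =>
    rw [PySem.List.pyRange_neg_one_eq_nil (show s ≤ -1 from by omega), List.foldl_nil]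
    unfold pvAxis
    refine List.map_congr_left ?_
    intro j hj
    rw [PySem.List.mem_pyRange_one] at hj
    rw [if_pos (by omega)]
  | succ m ih =>
    rw [PySem.List.pyRange_neg_one_cons (show (-1 : Int) < s from by push_cast at hk; omega),
        List.foldl_cons,
        stepDown_eq g c a b s hg (by push_cast at hk; omega) hs]
    exact ih (s - 1) (by omega) (by push_cast at hk ⊢; omega)

lemma pvAxis_eq (g c a b : Int) :
    pvLoopBwd g a b (pvLoopFwd g a b (List.replicate (g * 2 + 1).toNat c)) = pvAxis g c a b := by
  by_cases hg : 0 ≤ g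
  · have hfwd := fwd_inv g c a b hg g.toNat (by omega)
    rw [show g + 1 + (g.toNat : Int) = g * 2 + 1 from by omega] at hfwd
    have hmid : (PySem.List.pyRange 0 (g * 2 + 1) 1).map
          (fun j => if g ≤ j ∧ j < g * 2 + 1 then pvValue g c a b j else c)
        = (PySem.List.pyRange 0 (g * 2 + 1) 1).map
          (fun j => if g - 1 < j then pvValue g c a b j else c) := by
      refine List.map_congr_left ?_
      intro j hj
      rw [PySem.List.mem_pyRange_one] at hj
      by_cases hc : g ≤ j
      · rw [if_pos ⟨hc, by omega⟩, if_pos (by omega)]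
      · rw [if_neg (by omega), if_neg (by omega)]
    have hbwd := bwd_inv g c a b hg g.toNat (g - 1) (by omega) (by omega)
    unfold pvLoopFwd pvLoopBwd
    rw [hfwd, hmid, hbwd]
  · unfold pvLoopFwd pvLoopBwd pvAxis
    rw [PySem.List.pyRange_one_eq_nil (show g * 2 + 1 ≤ g + 1 from by omega), List.foldl_nil,
        PySem.List.pyRange_neg_one_eq_nil (show g - 1 ≤ -1 from by omega), List.foldl_nil,
        PySem.List.pyRange_one_eq_nil (show g * 2 + 1 ≤ 0 from by omega), List.map_nil,
        show (g * 2 + 1).toNat = 0 from by omega, List.replicate_zero]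

-- ===== VERDICT (by name: the statement is the Claim_ definition above) =====
theorem get_mirror_coordinates_spec : Claim_equal_get_mirror_coordinates := by
  intro dims pos mp g _ hpre
  unfold Spec_get_mirror_coordinates
  obtain ⟨hd, hm⟩ := hpre
  rcases dims with _ | ⟨x0, dims⟩
  · simp at hd
  rcases dims with _ | ⟨y0, dims⟩
  · simp at hd
  rcases dims with _ | ⟨z0, dims⟩
  case cons.cons.cons => simp at hd
  rcases mp with _ | ⟨m0, mp⟩
  · simp at hm
  rcases mp with _ | ⟨m1, mp⟩
  · simp at hm
  have h1 : PySem.List.pyGet? (m0 :: m1 :: mp) 1 = some m1 := by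
    simp [PySem.List.pyGet?, PySem.List.pyIdx?]
  simp only [get_mirror_coordinates, get_mirror_coordinates_alt,
    PySem.List.pyGet?_zero_cons, h1]
  norm_num
  exact ⟨pvAxis_eq g (pos.1 - m0) ((x0 - pos.1) * 2) (pos.1 * 2),
         pvAxis_eq g (pos.2 - m1) ((y0 - pos.2) * 2) (pos.2 * 2)⟩
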